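-- pv_equiv track=rewrite | github.com/chrislucas/hackerrank-lp-python | ds/sets/NoIdea/solution/NoIdea.py | sv1
-- ===== SOURCE A (Python) =====
-- def sv1(set_a, set_b, numbers):
--     acc = 0
--     for val in numbers:
--         if val in set_a:
--             acc += 1
--         if val in set_b:
--             acc -= 1
--     return acc
-- ===== SOURCE B (Python) =====
-- def sv1(set_a, set_b, numbers):
--     # Group numbers into a frequency table first, then score each DISTINCT
--     # value once, weighted by its multiplicity.
--     counts = {}
--     for v in numbers:
--         counts[v] = counts.get(v, 0) + 1
--     happiness = 0
--     for v, m in counts.items():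
--         if v in set_a:
--             happiness += m
--         if v in set_b:
--             happiness -= m
--     return happiness
-- ===== Notes on version B (the rewrite author's own statement) =====
-- stated objective: alternative
-- what changed: Instead of scoring every occurrence in a single pass, B first builds a frequency dictionary of numbers and then scores each distinct value once, adding/subtracting its multiplicity; membership in set_a/set_b is tested once per distinct value rather than once per occurrence.
import Mathlib
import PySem

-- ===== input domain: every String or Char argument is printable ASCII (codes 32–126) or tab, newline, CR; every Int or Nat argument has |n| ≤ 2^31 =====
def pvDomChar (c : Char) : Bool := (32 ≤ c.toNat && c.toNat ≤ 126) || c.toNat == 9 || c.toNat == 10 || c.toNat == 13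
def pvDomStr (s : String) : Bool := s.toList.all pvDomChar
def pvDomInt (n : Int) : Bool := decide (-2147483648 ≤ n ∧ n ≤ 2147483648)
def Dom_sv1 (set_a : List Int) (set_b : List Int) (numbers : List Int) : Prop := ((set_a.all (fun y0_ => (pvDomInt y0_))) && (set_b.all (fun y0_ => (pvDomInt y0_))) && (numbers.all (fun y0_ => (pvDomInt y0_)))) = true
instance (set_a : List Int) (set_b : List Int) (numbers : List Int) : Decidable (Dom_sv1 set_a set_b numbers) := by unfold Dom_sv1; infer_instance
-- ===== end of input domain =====

-- B groups numbers into a frequency dictionary and scores each distinct value once,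
-- weighted by its multiplicity, instead of scoring every occurrence (objective: alternative).

-- ===== PORT A =====
-- one pass: acc += 1 if val in set_a, acc -= 1 if val in set_b
def sv1 (set_a : List Int) (set_b : List Int) (numbers : List Int) : Int :=
  numbers.foldl (fun acc val =>
    let acc := if set_a.contains val then acc + 1 else acc
    if set_b.contains val then acc - 1 else acc) 0

-- ===== PORT B =====
-- build counts: counts[v] = counts.get(v, 0) + 1
def sv1AltCounts (numbers : List Int) : PySem.Dict Int Int :=
  numbers.foldl (fun d v => d.insert v (d.getD v 0 + 1)) PySem.Dict.empty

-- then score each distinct value once, weighted by its multiplicity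
def sv1_alt (set_a : List Int) (set_b : List Int) (numbers : List Int) : Int :=
  (sv1AltCounts numbers).items.foldl (fun happiness vm =>
    let happiness := if set_a.contains vm.1 then happiness + vm.2 else happiness
    if set_b.contains vm.1 then happiness - vm.2 else happiness) 0

-- ===== PRECONDITION & SPEC =====
def Spec_sv1 (set_a : List Int) (set_b : List Int) (numbers : List Int) (out : Int) : Prop := out = sv1_alt set_a set_b numbers
instance (set_a : List Int) (set_b : List Int) (numbers : List Int) (out : Int) : Decidable (Spec_sv1 set_a set_b numbers out) := by unfold Spec_sv1; infer_instance

-- ===== CLAIM =====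
def Claim_equal_sv1 : Prop := ∀ (set_a : List Int) (set_b : List Int) (numbers : List Int), Dom_sv1 set_a set_b numbers → Spec_sv1 set_a set_b numbers (sv1 set_a set_b numbers)

-- ===== LEMMAS AND PROOFS =====

-- A's fold equals the difference of the two per-occurrence membership counts
theorem sv1_foldl_eq (set_a set_b : List Int) (numbers : List Int) (acc : Int) :
    numbers.foldl (fun acc val =>
      let acc := if set_a.contains val then acc + 1 else acc
      if set_b.contains val then acc - 1 else acc) acc
    = acc + (numbers.countP (fun v => set_a.contains v) : Int)
        - (numbers.countP (fun v => set_b.contains v) : Int) := by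
  induction numbers generalizing acc with
  | nil => simp
  | cons x xs ih =>
    simp only [List.foldl_cons, List.countP_cons, ih]
    split_ifs <;> push_cast <;> ring

-- B's fold over (value, multiplicity) pairs equals a sum of per-pair weights
theorem sv1_alt_foldl_eq (set_a set_b : List Int) (ps : List (Int × Int)) (acc : Int) :
    ps.foldl (fun happiness vm =>
      let happiness := if set_a.contains vm.1 then happiness + vm.2 else happiness
      if set_b.contains vm.1 then happiness - vm.2 else happiness) acc
    = acc + (ps.map (fun vm =>
        (if set_a.contains vm.1 then vm.2 else 0)
          - (if set_b.contains vm.1 then vm.2 else 0))).sum := by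
  induction ps generalizing acc with
  | nil => simp
  | cons p ps ih =>
    simp only [List.foldl_cons, List.map_cons, List.sum_cons, ih]
    split_ifs <;> ring

-- summing an indicator of equality over a Nodup list containing x picks out c x
theorem sum_if_eq (L : List Int) (x : Int) (c : Int → Int)
    (hnd : L.Nodup) (hx : x ∈ L) :
    (L.map (fun k => if k = x then c k else (0:Int))).sum = c x := by
  induction L with
  | nil => cases hx
  | cons y ys ih =>
    simp only [List.nodup_cons] at hnd
    rcases List.mem_cons.mp hx with h | h
    · subst h
      have hz : (ys.map (fun k => if k = x then c k else (0:Int))).sum = 0 := by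
        apply List.sum_eq_zero
        intro z hz
        simp only [List.mem_map] at hz
        obtain ⟨k, hk, rfl⟩ := hz
        have : k ≠ x := fun e => hnd.1 (e ▸ hk)
        simp [this]
      simp [hz]
    · have hy : y ≠ x := fun e => hnd.1 (e ▸ h)
      simp [hy, ih hnd.2 h]

-- summing (if p k then count k else 0) over a Nodup cover of numbers gives countP
theorem sum_count_eq_countP (p : Int → Bool) (numbers L : List Int)
    (hnd : L.Nodup) (hcov : ∀ x ∈ numbers, x ∈ L) :
    (L.map (fun k => if p k then (numbers.count k : Int) else 0)).sum
      = (numbers.countP p : Int) := by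
  induction numbers with
  | nil => simp
  | cons x xs ih =>
    have hcov' : ∀ y ∈ xs, y ∈ L := fun y hy => hcov y (List.mem_cons_of_mem _ hy)
    have hsplit :
        (L.map (fun k => if p k then ((x :: xs).count k : Int) else 0)).sum
        = (L.map (fun k => if p k then (xs.count k : Int) else 0)).sum
          + (L.map (fun k => if k = x then (if p k then (1:Int) else 0) else 0)).sum := by
      rw [← List.sum_map_add]
      apply congrArg List.sum
      apply List.map_congr_left
      intro k _
      by_cases hk : k = x
      · subst hk
        simp [List.count_cons_self]
        split_ifs <;> push_cast <;> ring
      · have hk' : ¬ x = k := fun e => hk e.symm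
        have : (x :: xs).count k = xs.count k := by simp [List.count_cons, hk']
        simp [this, hk]
    rw [hsplit, ih hcov',
        sum_if_eq L x (fun k => if p k then (1:Int) else 0) hnd (hcov x (List.mem_cons_self))]
    simp only [List.countP_cons]
    split_ifs <;> push_cast <;> ring

theorem sv1_spec : Claim_equal_sv1 := by
  intro set_a set_b numbers _
  unfold Spec_sv1 sv1 sv1_alt sv1AltCounts
  rw [sv1_foldl_eq, PySem.Dict.foldl_insert_getD_add_one_eq_counter,
      PySem.Dict.items_counter, sv1_alt_foldl_eq, List.map_map]
  have hsub :
      ((PySem.Set.ofList numbers).map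
        ((fun vm : Int × Int =>
            (if set_a.contains vm.1 then vm.2 else 0)
              - (if set_b.contains vm.1 then vm.2 else 0))
          ∘ fun k => (k, (numbers.count k : Int)))).sum
      = ((PySem.Set.ofList numbers).map
            (fun k => if set_a.contains k then (numbers.count k : Int) else 0)).sum
        - ((PySem.Set.ofList numbers).map
            (fun k => if set_b.contains k then (numbers.count k : Int) else 0)).sum := by
    induction (PySem.Set.ofList numbers) with
    | nil => simp
    | cons y ys ih => simp only [List.map_cons, List.sum_cons, ih, Function.comp]; ring
  rw [hsub,
      sum_count_eq_countP _ numbers _ (PySem.Set.nodup_ofList numbers)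
        (fun x hx => (PySem.Set.mem_ofList numbers x).mpr hx),
      sum_count_eq_countP _ numbers _ (PySem.Set.nodup_ofList numbers)
        (fun x hx => (PySem.Set.mem_ofList numbers x).mpr hx)]
  ring
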